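-- pv_equiv track=rewrite | github.com/slubbles/AI-agents | agent-brain/hands/output_polisher.py | _fix_general
-- ===== SOURCE A (Python) =====
-- def _fix_general(filepath: str, content: str) -> tuple[str, list[str]]:
--     """General fixes applicable to all text files."""
--     fixes = []
--
--     # Ensure trailing newline
--     if content and not content.endswith("\n"):
--         content += "\n"
--         fixes.append("added_trailing_newline")
--
--     # Remove null bytes (corrupted output)
--     if "\x00" in content:
--         content = content.replace("\x00", "")
--         fixes.append("removed_null_bytes")
--
--     # Remove excessive trailing blank lines (keep max 1)
--     lines = content.split("\n")
--     while len(lines) > 2 and lines[-1] == "" and lines[-2] == "":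
--         lines.pop(-1)
--         if "trimmed_trailing_blank_lines" not in fixes:
--             fixes.append("trimmed_trailing_blank_lines")
--     content = "\n".join(lines)
--
--     return content, fixes
-- ===== SOURCE B (Python) =====
-- def _fix_general(filepath: str, content: str) -> tuple[str, list[str]]:
--     """General fixes applicable to all text files."""
--     fixes = []
--
--     # Ensure trailing newline
--     if content and not content.endswith("\n"):
--         content += "\n"
--         fixes.append("added_trailing_newline")
--
--     # Remove null bytes (corrupted output)
--     if "\x00" in content:
--         content = content.replace("\x00", "")
--         fixes.append("removed_null_bytes")
--
--     # Collapse a run of 2+ trailing newlines to a single one (no split/join pass)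
--     stripped = content.rstrip("\n")
--     if len(content) - len(stripped) >= 2:
--         content = stripped + "\n"
--         fixes.append("trimmed_trailing_blank_lines")
--
--     return content, fixes
-- ===== Notes on version B (the rewrite author's own statement) =====
-- stated objective: simpler
-- what changed: The split('\n') / while-pop / join('\n') pass over all lines is replaced by a direct operation on the string tail: rstrip('\n') and, when at least two newlines were stripped, re-append a single newline and record the fix; no line list is ever built.
import Mathlib
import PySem

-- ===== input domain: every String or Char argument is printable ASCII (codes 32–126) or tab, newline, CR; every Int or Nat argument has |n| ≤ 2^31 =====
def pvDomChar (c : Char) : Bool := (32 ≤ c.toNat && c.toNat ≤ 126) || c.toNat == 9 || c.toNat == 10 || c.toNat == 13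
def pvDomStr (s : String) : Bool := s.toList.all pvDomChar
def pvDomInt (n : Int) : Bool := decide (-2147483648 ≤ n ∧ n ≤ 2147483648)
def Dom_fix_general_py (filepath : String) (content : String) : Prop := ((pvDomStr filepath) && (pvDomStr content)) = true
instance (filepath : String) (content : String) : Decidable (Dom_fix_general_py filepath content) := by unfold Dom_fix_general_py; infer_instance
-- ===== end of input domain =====

-- B replaces A's split/while-pop/join pass over the line list by a direct rstrip of the
-- trailing newline run (objective: simpler). Equivalence is proved on all inputs.

-- ===== PORT A =====

-- the while-pop loop of A: while len(lines) > 2 and lines[-1] == "" and lines[-2] == "": pop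
-- (lines.pop(-1) on a list the guard proves nonempty removes exactly the last element: dropLast)
def pvPopLoopA (lines : List (List Char)) (fixes : List String) : List (List Char) × List String :=
  if 2 < lines.length ∧ PySem.List.pyGet? lines (-1) = some ([] : List Char) ∧
      PySem.List.pyGet? lines (-2) = some ([] : List Char) then
    pvPopLoopA lines.dropLast
      (if "trimmed_trailing_blank_lines" ∈ fixes then fixes
       else fixes ++ ["trimmed_trailing_blank_lines"])
  else (lines, fixes)
termination_by lines.length
decreasing_by
  rename_i h
  have : lines.dropLast.length = lines.length - 1 := List.length_dropLast
  omega

def fix_general_py (filepath : String) (content : String) : String × List String :=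
  let cs := content.toList
  let r1 : List Char × List String :=
    if cs ≠ [] ∧ PySem.Chars.endswith cs ['\n'] = false
    then (cs ++ ['\n'], ["added_trailing_newline"]) else (cs, [])
  let r2 : List Char × List String :=
    if PySem.Chars.isIn [Char.ofNat 0] r1.1 = true
    then (PySem.Chars.replace r1.1 [Char.ofNat 0] [], r1.2 ++ ["removed_null_bytes"]) else r1
  let lines := PySem.Chars.splitOn r2.1 ['\n']
  let r3 := pvPopLoopA lines r2.2
  (String.ofList (PySem.Chars.join ['\n'] r3.1), r3.2)

-- ===== PORT B =====

def fix_general_py_alt (filepath : String) (content : String) : String × List String :=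
  let cs := content.toList
  let r1 : List Char × List String :=
    if cs ≠ [] ∧ PySem.Chars.endswith cs ['\n'] = false
    then (cs ++ ['\n'], ["added_trailing_newline"]) else (cs, [])
  let r2 : List Char × List String :=
    if PySem.Chars.isIn [Char.ofNat 0] r1.1 = true
    then (PySem.Chars.replace r1.1 [Char.ofNat 0] [], r1.2 ++ ["removed_null_bytes"]) else r1
  -- content.rstrip("\n"), ported by hand: drop exactly the maximal trailing run of '\n' (exact)
  let stripped := (r2.1.reverse.dropWhile (· == '\n')).reverse
  if (2 : Int) ≤ (r2.1.length : Int) - (stripped.length : Int)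
  then (String.ofList (stripped ++ ['\n']), r2.2 ++ ["trimmed_trailing_blank_lines"])
  else (String.ofList r2.1, r2.2)

-- ===== PRECONDITION & SPEC =====
def Spec_fix_general_py (filepath : String) (content : String) (out : String × List String) : Prop := out = fix_general_py_alt filepath content
instance (filepath : String) (content : String) (out : String × List String) : Decidable (Spec_fix_general_py filepath content out) := by unfold Spec_fix_general_py; infer_instance

-- ===== CLAIM (what is proved, stated in full; the proofs are below) =====
def Claim_equal_fix_general_py : Prop := ∀ (filepath : String) (content : String), Dom_fix_general_py filepath content → Spec_fix_general_py filepath content (fix_general_py filepath content)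

-- ===== LEMMAS AND PROOFS =====

-- A reference form of split("\n"): structural recursion over the string
def pvSplit (pre : List Char) : List Char → List (List Char)
  | [] => [pre]
  | c :: rest => if c = '\n' then pre :: pvSplit [] rest else pvSplit (pre ++ [c]) rest

theorem pvSplit_ne_nil (pre : List Char) (l : List Char) : pvSplit pre l ≠ [] := by
  induction l generalizing pre with
  | nil => simp [pvSplit]
  | cons c rest ih => by_cases h : c = '\n' <;> simp [pvSplit, h, ih]

theorem pv_go_spec (l : List Char) (fuel : Nat) (cur : List Char) (acc : List (List Char))
    (h : l.length ≤ fuel) :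
    PySem.Chars.splitOn.go ['\n'] fuel l cur acc = acc.reverse ++ pvSplit cur.reverse l := by
  induction l generalizing fuel cur acc with
  | nil =>
    cases fuel <;> simp [PySem.Chars.splitOn.go, pvSplit]
  | cons c rest ih =>
    cases fuel with
    | zero => simp at h
    | succ m =>
      by_cases hc : c = '\n'
      · subst hc
        simp only [PySem.Chars.splitOn.go, List.isPrefixOf, pvSplit]
        simp only [beq_self_eq_true, Bool.true_and, if_true,
          List.length_singleton, List.drop_succ_cons, List.drop_zero]
        rw [ih m [] (cur.reverse :: acc) (by simpa using Nat.le_of_succ_le_succ h)]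
        simp
      · simp only [PySem.Chars.splitOn.go, List.isPrefixOf, pvSplit]
        have hbeq : ('\n' == c) = false := by simpa [beq_iff_eq] using (Ne.symm hc)
        simp only [hbeq, Bool.false_and, if_neg Bool.false_ne_true, if_neg hc]
        rw [ih m (c :: cur) acc (by simpa using Nat.le_of_succ_le_succ h)]
        simp

theorem pv_splitOn_eq (s : List Char) : PySem.Chars.splitOn s ['\n'] = pvSplit [] s := by
  unfold PySem.Chars.splitOn
  rw [pv_go_spec s (s.length + 1) [] [] (by omega)]
  simp

theorem pvSplit_append_nl (pre x : List Char) :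
    pvSplit pre (x ++ ['\n']) = pvSplit pre x ++ [[]] := by
  induction x generalizing pre with
  | nil => simp [pvSplit]
  | cons c rest ih => by_cases h : c = '\n' <;> simp [pvSplit, h, ih]

theorem pvSplit_append_replicate (pre t : List Char) (k : Nat) :
    pvSplit pre (t ++ List.replicate k '\n') = pvSplit pre t ++ List.replicate k [] := by
  induction k with
  | zero => simp
  | succ n ih =>
    rw [List.replicate_succ', ← List.append_assoc, pvSplit_append_nl, ih,
      List.replicate_succ', List.append_assoc]

theorem pv_getLast?_cons_ne {α : Type} (a : α) (l : List α) (h : l ≠ []) :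
    (a :: l).getLast? = l.getLast? := by
  cases l with
  | nil => exact absurd rfl h
  | cons b l' => exact List.getLast?_cons_cons ..

theorem pvSplit_getLast (pre t : List Char) (ht : t ≠ []) (hl : t.getLast? ≠ some '\n') :
    ∃ q, (pvSplit pre t).getLast? = some q ∧ q ≠ [] := by
  induction t generalizing pre with
  | nil => exact absurd rfl ht
  | cons c rest ih =>
    by_cases hr : rest = []
    · subst hr
      have hc : c ≠ '\n' := by simpa [List.getLast?] using hl
      refine ⟨pre ++ [c], ?_, by simp⟩
      simp [pvSplit, hc]
    · have hl' : rest.getLast? ≠ some '\n' := by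
        rwa [pv_getLast?_cons_ne _ _ hr] at hl
      by_cases hc : c = '\n'
      · subst hc
        obtain ⟨q, hq, hqne⟩ := ih [] hr hl'
        refine ⟨q, ?_, hqne⟩
        simp only [pvSplit, if_true]
        rwa [pv_getLast?_cons_ne _ _ (pvSplit_ne_nil [] rest)]
      · obtain ⟨q, hq, hqne⟩ := ih (pre ++ [c]) hr hl'
        exact ⟨q, by simpa [pvSplit, hc] using hq, hqne⟩

-- join = intercalate helpers
theorem pv_intercalate_cons_ne (s x : List Char) (ys : List (List Char)) (h : ys ≠ []) :
    s.intercalate (x :: ys) = x ++ s ++ s.intercalate ys := by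
  cases ys with
  | nil => exact absurd rfl h
  | cons y ys' => simp [List.intercalate, List.intersperse]

theorem pv_join_pvSplit (pre t : List Char) :
    List.intercalate ['\n'] (pvSplit pre t) = pre ++ t := by
  induction t generalizing pre with
  | nil => simp [pvSplit, List.intercalate]
  | cons c rest ih =>
    by_cases hc : c = '\n'
    · subst hc
      rw [pvSplit, if_pos rfl, pv_intercalate_cons_ne _ _ _ (pvSplit_ne_nil [] rest), ih]
      simp
    · rw [pvSplit, if_neg hc, ih]
      simp

theorem pv_intercalate_concat_nil (s : List Char) (p : List (List Char)) (h : p ≠ []) :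
    List.intercalate s (p ++ [[]]) = List.intercalate s p ++ s := by
  induction p with
  | nil => exact absurd rfl h
  | cons x ys ih =>
    cases ys with
    | nil => simp [List.intercalate, List.intersperse]
    | cons y ys' =>
      rw [List.cons_append, pv_intercalate_cons_ne s x (y :: ys' ++ [[]]) (by simp),
        pv_intercalate_cons_ne s x (y :: ys') (by simp), ih (by simp)]
      simp

-- the "append the flag once" step of A's loop
def pvAddFlag (f : List String) : List String :=
  if "trimmed_trailing_blank_lines" ∈ f then f else f ++ ["trimmed_trailing_blank_lines"]

theorem pvAddFlag_idem (f : List String) : pvAddFlag (pvAddFlag f) = pvAddFlag f := by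
  unfold pvAddFlag
  by_cases h : "trimmed_trailing_blank_lines" ∈ f <;> simp [h]

-- A's while-loop on a line list whose last real line is nonempty, followed by k empty lines
theorem pvPopLoopA_spec (k : Nat) (p : List (List Char)) (f : List String) (q : List Char)
    (hq : p.getLast? = some q) (hqne : q ≠ []) :
    pvPopLoopA (p ++ List.replicate k ([] : List Char)) f =
      if 2 ≤ k then (p ++ [[]], pvAddFlag f) else (p ++ List.replicate k [], f) := by
  have hp : p ≠ [] := by intro h; simp [h] at hq
  induction k using Nat.strong_induction_on generalizing f with
  | _ k ih =>
    match k with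
    | 0 =>
      rw [pvPopLoopA]
      rw [if_neg]
      · simp
      · intro ⟨_, h1, _⟩
        rw [List.replicate_zero, List.append_nil, PySem.List.pyGet?_neg_one, hq] at h1
        exact hqne (by simpa using h1)
    | 1 =>
      rw [pvPopLoopA]
      rw [if_neg]
      · simp
      · intro ⟨hlen, _, h2⟩
        have hlen' : 2 ≤ (p ++ List.replicate 1 ([] : List Char)).length := by omega
        rw [show (-2 : Int) = -((2:Nat):Int) from by norm_num] at h2
        rw [PySem.List.pyGet?_neg_natCast _ 2 (by omega) hlen'] at h2
        have hplen : 1 ≤ p.length := List.length_pos_iff.mpr hp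
        have hidx : (p ++ List.replicate 1 ([] : List Char)).length - 2 = p.length - 1 := by
          simp
        rw [hidx, List.getElem?_append_left (by omega), ← List.getLast?_eq_getElem?, hq] at h2
        exact hqne (by simpa using h2)
    | (m+2) =>
      have hplen : 1 ≤ p.length := List.length_pos_iff.mpr hp
      have hrep : List.replicate (m+2) ([] : List Char) =
          List.replicate (m+1) ([] : List Char) ++ [[]] := by
        rw [← List.replicate_succ']
      have hcond : 2 < (p ++ List.replicate (m+2) ([] : List Char)).length ∧
          PySem.List.pyGet? (p ++ List.replicate (m+2) ([] : List Char)) (-1) = some [] ∧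
          PySem.List.pyGet? (p ++ List.replicate (m+2) ([] : List Char)) (-2) = some [] := by
        refine ⟨by simp; omega, ?_, ?_⟩
        · rw [hrep, ← List.append_assoc, PySem.List.pyGet?_neg_one, List.getLast?_concat]
        · have hlen2 : 2 ≤ (p ++ List.replicate (m+2) ([] : List Char)).length := by
            simp; omega
          rw [show (-2 : Int) = -((2:Nat):Int) from by norm_num,
            PySem.List.pyGet?_neg_natCast _ 2 (by omega) hlen2]
          have hidx : (p ++ List.replicate (m+2) ([] : List Char)).length - 2 =
              p.length + m := by simp; omega
          rw [hidx, List.getElem?_append_right (by omega)]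
          simp
      rw [pvPopLoopA, if_pos hcond]
      have hdl : (p ++ List.replicate (m+2) ([] : List Char)).dropLast =
          p ++ List.replicate (m+1) ([] : List Char) := by
        rw [hrep, ← List.append_assoc, List.dropLast_concat]
      rw [hdl]
      have haf : (if "trimmed_trailing_blank_lines" ∈ f then f
          else f ++ ["trimmed_trailing_blank_lines"]) = pvAddFlag f := rfl
      rw [haf, ih (m+1) (by omega) (f := pvAddFlag f), pvAddFlag_idem]
      match m with
      | 0 => norm_num
      | n+1 => rw [if_pos (by omega), if_pos (by omega)]

-- A's while-loop on an all-empty line list (content was newlines only)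
theorem pvPopLoopA_rep (m : Nat) (f : List String) :
    pvPopLoopA (List.replicate m ([] : List Char)) f =
      if 3 ≤ m then (List.replicate 2 [], pvAddFlag f)
      else (List.replicate m [], f) := by
  induction m using Nat.strong_induction_on generalizing f with
  | _ m ih =>
    match m with
    | 0 => rw [pvPopLoopA, if_neg (by simp)]; simp
    | 1 => rw [pvPopLoopA, if_neg (by simp)]; simp
    | 2 => rw [pvPopLoopA, if_neg (by simp)]; simp
    | (n+3) =>
      have hrep : List.replicate (n+3) ([] : List Char) =
          List.replicate (n+2) ([] : List Char) ++ [[]] := List.replicate_succ' ..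
      have hcond : 2 < (List.replicate (n+3) ([] : List Char)).length ∧
          PySem.List.pyGet? (List.replicate (n+3) ([] : List Char)) (-1) = some [] ∧
          PySem.List.pyGet? (List.replicate (n+3) ([] : List Char)) (-2) = some [] := by
        refine ⟨by simp, ?_, ?_⟩
        · rw [hrep, PySem.List.pyGet?_neg_one, List.getLast?_concat]
        · rw [show (-2 : Int) = -((2:Nat):Int) from by norm_num,
            PySem.List.pyGet?_neg_natCast _ 2 (by omega) (by simp)]
          simp
      rw [pvPopLoopA, if_pos hcond]
      have hdl : (List.replicate (n+3) ([] : List Char)).dropLast =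
          List.replicate (n+2) ([] : List Char) := by
        rw [hrep, List.dropLast_concat]
      rw [hdl]
      have haf : (if "trimmed_trailing_blank_lines" ∈ f then f
          else f ++ ["trimmed_trailing_blank_lines"]) = pvAddFlag f := rfl
      rw [haf, ih (n+2) (by omega), pvAddFlag_idem]
      match n with
      | 0 => norm_num
      | j+1 => rw [if_pos (by omega), if_pos (by omega)]

-- trailing-newline decomposition of a string
theorem pv_decomp (cs : List Char) :
    cs = (cs.reverse.dropWhile (· == '\n')).reverse ++
      List.replicate (cs.reverse.takeWhile (· == '\n')).length '\n' := by
  conv_lhs => rw [← List.reverse_reverse cs,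
    ← List.takeWhile_append_dropWhile (p := (· == '\n')) (l := cs.reverse)]
  rw [List.reverse_append]
  congr 1
  have h : ∀ b ∈ cs.reverse.takeWhile (· == '\n'), b = '\n' := fun b hb => by
    simpa using List.mem_takeWhile_imp hb
  conv_lhs => rw [List.eq_replicate_of_mem h]
  rw [List.reverse_replicate]

theorem pv_noNL (cs : List Char) :
    ((cs.reverse.dropWhile (· == '\n')).reverse).getLast? ≠ some '\n' := by
  rw [List.getLast?_reverse]
  intro h
  have := List.head?_dropWhile_not (p := (· == '\n')) (l := cs.reverse)
  rw [h] at this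
  simpa using this

theorem pv_main (cs : List Char) (f : List String)
    (hf : "trimmed_trailing_blank_lines" ∉ f) :
    (String.ofList (PySem.Chars.join ['\n'] (pvPopLoopA (PySem.Chars.splitOn cs ['\n']) f).1),
      (pvPopLoopA (PySem.Chars.splitOn cs ['\n']) f).2) =
    (if (2 : Int) ≤ (cs.length : Int) - (((cs.reverse.dropWhile (· == '\n')).reverse).length : Int)
     then (String.ofList ((cs.reverse.dropWhile (· == '\n')).reverse ++ ['\n']),
           f ++ ["trimmed_trailing_blank_lines"])
     else (String.ofList cs, f)) := by
  set t := (cs.reverse.dropWhile (· == '\n')).reverse with ht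
  set k := (cs.reverse.takeWhile (· == '\n')).length with hk
  have hdec : cs = t ++ List.replicate k '\n' := pv_decomp cs
  have hnl : t.getLast? ≠ some '\n' := by rw [ht]; exact pv_noNL cs
  have haf : pvAddFlag f = f ++ ["trimmed_trailing_blank_lines"] := by simp [pvAddFlag, hf]
  rw [hdec, pv_splitOn_eq, pvSplit_append_replicate]
  have hlen : ((t ++ List.replicate k '\n').length : Int) - (t.length : Int) = (k : Int) := by
    simp
  rw [hlen]
  by_cases htnil : t = []
  · rw [htnil]
    have hrep : pvSplit [] ([] : List Char) ++ List.replicate k ([] : List Char) =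
        List.replicate (k+1) [] := by
      simp [pvSplit, List.replicate_succ]
    rw [hrep, pvPopLoopA_rep]
    by_cases h2k : 2 ≤ k
    · rw [if_pos (by omega : 3 ≤ k + 1), if_pos (by exact_mod_cast h2k), haf]
      simp [PySem.Chars.join, List.intercalate, List.intersperse]
    · rw [if_neg (by omega : ¬ 3 ≤ k + 1), if_neg (by exact_mod_cast h2k)]
      interval_cases k
      · simp [PySem.Chars.join, List.intercalate, List.intersperse]
      · simp [PySem.Chars.join, List.intercalate, List.intersperse, List.replicate_succ]
  · obtain ⟨q, hq, hqne⟩ := pvSplit_getLast [] t htnil hnl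
    rw [pvPopLoopA_spec k (pvSplit [] t) f q hq hqne]
    by_cases h2k : 2 ≤ k
    · rw [if_pos h2k, if_pos (by exact_mod_cast h2k), haf]
      simp only [PySem.Chars.join]
      rw [pv_intercalate_concat_nil _ _ (pvSplit_ne_nil [] t), pv_join_pvSplit]
      simp
    · rw [if_neg h2k, if_neg (by exact_mod_cast h2k)]
      interval_cases k
      · simp only [PySem.Chars.join, List.replicate_zero, List.append_nil]
        rw [pv_join_pvSplit]
        simp
      · simp only [PySem.Chars.join, List.replicate_succ, List.replicate_zero]
        rw [show (pvSplit [] t ++ [([] : List Char)]) = pvSplit [] t ++ [[]] from rfl,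
          pv_intercalate_concat_nil _ _ (pvSplit_ne_nil [] t), pv_join_pvSplit]
        simp

-- ===== VERDICT (by name: the statement is the Claim_ definition above) =====
theorem fix_general_py_spec : Claim_equal_fix_general_py := by
  intro filepath content _
  unfold Spec_fix_general_py fix_general_py fix_general_py_alt
  by_cases h1 : (content.toList ≠ [] ∧ PySem.Chars.endswith content.toList ['\n'] = false)
  · simp only [if_pos h1]
    by_cases h2 : PySem.Chars.isIn [Char.ofNat 0] (content.toList ++ ['\n']) = true
    · simp only [if_pos h2]
      exact pv_main _ _ (by decide)
    · simp only [if_neg h2]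
      exact pv_main _ _ (by decide)
  · simp only [if_neg h1]
    by_cases h2 : PySem.Chars.isIn [Char.ofNat 0] content.toList = true
    · simp only [if_pos h2]
      exact pv_main _ _ (by decide)
    · simp only [if_neg h2]
      exact pv_main _ _ (by decide)
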